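-- pv_equiv track=rewrite | github.com/annemarie04/APD | Tema 1/Matrix Distribution/matrix_columns.py | calculate_column_distribution
-- ===== SOURCE A (Python) =====
-- def calculate_column_distribution(n, p):
--     column_info = []
--
--     # Calculate base number of columns per process and remainder
--     base_cols = n // p
--     extra_cols = n % p
--
--     start_col = 0
--     for rank in range(p):
--         # Processes with rank < extra_cols get one extra column
--         num_cols = base_cols + (1 if rank < extra_cols else 0)
--
--         column_info.append({
--             'rank': rank,
--             'start_col': start_col,
--             'num_cols': num_cols,
--             'total_elements': n * num_cols  # n_rows * num_cols
--         })
--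
--         start_col += num_cols
--
--     return column_info
-- ===== SOURCE B (Python) =====
-- def calculate_column_distribution(n, p):
--     base_cols = n // p
--     extra_cols = n % p
--     return [{
--         'rank': rank,
--         'start_col': rank * base_cols + min(rank, extra_cols),
--         'num_cols': base_cols + (1 if rank < extra_cols else 0),
--         'total_elements': n * (base_cols + (1 if rank < extra_cols else 0)),
--     } for rank in range(p)]
-- ===== Notes on version B (the rewrite author's own statement) =====
-- stated objective: alternative
-- what changed: Replaced the sequential loop carrying a running start_col accumulator by an accumulator-free comprehension that computes each process entry independently from its rank via the closed form rank*base_cols + min(rank, extra_cols).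
import Mathlib
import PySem

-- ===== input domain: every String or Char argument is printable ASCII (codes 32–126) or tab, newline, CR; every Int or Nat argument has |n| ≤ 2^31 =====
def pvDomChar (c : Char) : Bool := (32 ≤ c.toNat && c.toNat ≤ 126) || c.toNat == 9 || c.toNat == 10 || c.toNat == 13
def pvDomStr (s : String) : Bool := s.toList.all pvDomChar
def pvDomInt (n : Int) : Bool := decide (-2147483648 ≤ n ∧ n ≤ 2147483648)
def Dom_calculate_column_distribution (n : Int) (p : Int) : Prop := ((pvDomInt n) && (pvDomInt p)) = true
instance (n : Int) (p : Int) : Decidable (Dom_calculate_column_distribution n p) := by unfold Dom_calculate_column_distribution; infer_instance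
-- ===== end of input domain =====

-- B removes A's running start_col accumulator: each entry is computed independently
-- from its rank by the closed form rank*base_cols + min(rank, extra_cols) (objective: alternative).

-- ===== PORT A =====
def calculate_column_distribution (n : Int) (p : Int) : List (List (String × Int)) :=
  let base_cols := PySem.Int.floordiv n p
  let extra_cols := PySem.Int.mod n p
  ((PySem.List.pyRange 0 p 1).foldl
    (fun (st : List (List (String × Int)) × Int) rank =>
      let num_cols := base_cols + (if rank < extra_cols then 1 else 0)
      (st.1 ++ [[("rank", rank), ("start_col", st.2), ("num_cols", num_cols),
                 ("total_elements", n * num_cols)]],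
       st.2 + num_cols))
    ([], 0)).1

-- ===== PORT B =====
def calculate_column_distribution_alt (n : Int) (p : Int) : List (List (String × Int)) :=
  let base_cols := PySem.Int.floordiv n p
  let extra_cols := PySem.Int.mod n p
  (PySem.List.pyRange 0 p 1).map (fun rank =>
    [("rank", rank),
     ("start_col", rank * base_cols + min rank extra_cols),
     ("num_cols", base_cols + (if rank < extra_cols then 1 else 0)),
     ("total_elements", n * (base_cols + (if rank < extra_cols then 1 else 0)))])

-- ===== PRECONDITION & SPEC =====
-- Python raises ZeroDivisionError at n // p when p == 0; both A and B raise there.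
def Pre_calculate_column_distribution (n : Int) (p : Int) : Prop := p ≠ 0
instance (n : Int) (p : Int) : Decidable (Pre_calculate_column_distribution n p) := by unfold Pre_calculate_column_distribution; infer_instance

def pvWitness_calculate_column_distribution : Int × Int := (7, 3)

def Spec_calculate_column_distribution (n : Int) (p : Int) (out : List (List (String × Int))) : Prop := out = calculate_column_distribution_alt n p
instance (n : Int) (p : Int) (out : List (List (String × Int))) : Decidable (Spec_calculate_column_distribution n p out) := by unfold Spec_calculate_column_distribution; infer_instance

-- ===== CLAIM (what is proved, stated in full; the proofs are below) =====
def Claim_equal_calculate_column_distribution : Prop := ∀ (n : Int) (p : Int), Dom_calculate_column_distribution n p → Pre_calculate_column_distribution n p → Spec_calculate_column_distribution n p (calculate_column_distribution n p)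

-- ===== LEMMAS AND PROOFS =====

-- Loop invariant: folding A's step over range-elements a, a+1, … with start_col
-- equal to a*base + min a extra yields the closed-form entries appended to acc.
theorem pv_key (n base extra : Int) :
    ∀ (m : Nat) (a : Int) (acc : List (List (String × Int))),
    ((List.range m).map (fun (k : Nat) => a + (k : Int))).foldl
      (fun (st : List (List (String × Int)) × Int) rank =>
        let num_cols := base + (if rank < extra then 1 else 0)
        (st.1 ++ [[("rank", rank), ("start_col", st.2), ("num_cols", num_cols),
                   ("total_elements", n * num_cols)]],
         st.2 + num_cols))
      (acc, a * base + min a extra)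
    = (acc ++ ((List.range m).map (fun (k : Nat) => a + (k : Int))).map (fun rank =>
        [("rank", rank),
         ("start_col", rank * base + min rank extra),
         ("num_cols", base + (if rank < extra then 1 else 0)),
         ("total_elements", n * (base + (if rank < extra then 1 else 0)))]),
       (a + m) * base + min (a + m) extra) := by
  intro m
  induction m with
  | zero => intro a acc; simp
  | succ m ih =>
    intro a acc
    rw [List.range_succ_eq_map]
    simp only [List.map_cons, List.foldl_cons, List.map_map, Nat.cast_zero, add_zero]
    have hshift : ((fun k : Nat => a + (k : Int)) ∘ Nat.succ)
        = fun k : Nat => (a + 1) + (k : Int) := by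
      funext k; simp [Function.comp, Nat.succ_eq_add_one]; push_cast; ring
    have hstart : a * base + min a extra + (base + (if a < extra then 1 else 0))
        = (a + 1) * base + min (a + 1) extra := by
      rcases lt_or_ge a extra with h | h
      · simp only [if_pos h]
        have : min a extra = a := by omega
        have h2 : min (a + 1) extra = a + 1 := by omega
        rw [this, h2]; ring
      · simp only [if_neg (not_lt.mpr h)]
        have : min a extra = extra := by omega
        have h2 : min (a + 1) extra = extra := by omega
        rw [this, h2]; ring
    rw [hshift]
    have := ih (a + 1) (acc ++ [[("rank", a), ("start_col", a * base + min a extra),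
      ("num_cols", base + (if a < extra then 1 else 0)),
      ("total_elements", n * (base + (if a < extra then 1 else 0)))]])
    rw [hstart] at *
    have hc : a + 1 + (m : Int) = a + ((m + 1 : Nat) : Int) := by push_cast; ring
    rw [this, List.append_assoc, hc]
    simp [List.map_map]

-- ===== VERDICT (by name: the statement is the Claim_ definition above) =====
theorem calculate_column_distribution_spec : Claim_equal_calculate_column_distribution := by
  intro n p _hdom hp
  unfold Spec_calculate_column_distribution
  unfold calculate_column_distribution calculate_column_distribution_alt
  dsimp only
  rcases (by omega : p ≤ 0 ∨ 0 < p) with hle | hpos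
  · rw [PySem.List.pyRange_one_eq_nil (by omega)]; rfl
  · rw [PySem.List.pyRange_one]
    have key := pv_key n (PySem.Int.floordiv n p) (PySem.Int.mod n p) (p - 0).toNat 0 []
    have hmin : min (0 : Int) (PySem.Int.mod n p) = 0 := by
      have := PySem.Int.mod_nonneg (a := n) hpos
      omega
    rw [hmin, zero_mul, add_zero] at key
    rw [key]
    simp
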